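-- pv_equiv track=rewrite | github.com/rochaadouglas/Python | UFSC/introd-PO/function_multiplication_on_the_matrix.py | multiplicMatrix
-- ===== SOURCE A (Python) =====
-- def multiplicMatrix(matrix, num):
--     mult = num
--     size = len(matrix)
--     line = 0
--     new_matrix = []
--     while line < size:
--         amount_col = len(matrix[line])
--         col = 0
--         new_list = []
--         while col < amount_col:
--             mult_ele = matrix[line][col] * mult
--             if line == col:
--                 mult_ele = matrix[line][col] * 0
--             new_list.append(mult_ele)
--             col += 1
--         line += 1
--         new_matrix.append(new_list)
--     return new_matrix
-- ===== SOURCE B (Python) =====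
-- def multiplicMatrix(matrix, num):
--     def scale(xs):
--         return [x * num for x in xs]
--
--     def go(rows, i):
--         if not rows:
--             return []
--         row = rows[0]
--         if i < len(row):
--             head = scale(row[:i]) + [0] + scale(row[i + 1:])
--         else:
--             head = scale(row)
--         return [head] + go(rows[1:], i + 1)
--
--     return go(matrix, 0)
-- ===== Notes on version B (the rewrite author's own statement) =====
-- stated objective: alternative
-- what changed: Replaces the index-driven nested while loops with a per-element diagonal branch by a branch-free recursion over rows that builds each row from slices: scaled prefix row[:i], a literal 0, and scaled suffix row[i+1:].
import Mathlib
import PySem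

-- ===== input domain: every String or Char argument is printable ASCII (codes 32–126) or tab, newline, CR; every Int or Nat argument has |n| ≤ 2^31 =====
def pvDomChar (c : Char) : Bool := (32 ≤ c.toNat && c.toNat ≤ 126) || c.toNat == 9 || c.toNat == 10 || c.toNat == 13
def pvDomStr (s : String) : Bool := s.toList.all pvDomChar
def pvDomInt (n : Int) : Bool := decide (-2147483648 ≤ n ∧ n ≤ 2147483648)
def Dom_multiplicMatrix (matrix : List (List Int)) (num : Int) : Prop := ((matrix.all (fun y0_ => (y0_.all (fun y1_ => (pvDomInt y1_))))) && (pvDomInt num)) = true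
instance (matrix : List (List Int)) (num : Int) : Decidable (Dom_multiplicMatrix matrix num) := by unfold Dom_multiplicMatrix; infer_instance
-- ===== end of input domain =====

-- B drops the per-element diagonal test: a recursion over rows builds each row from slices
-- (scaled prefix, literal 0, scaled suffix) — an alternative decomposition, same cost.
-- ===== PORT A =====
-- transliteration of A: outer while over rows, inner while over columns, appending to accumulators
def multiplicMatrix (matrix : List (List Int)) (num : Int) : List (List Int) :=
  (List.range matrix.length).foldl
    (fun new_matrix line =>
      let amount_col := (matrix.getD line []).length
      let new_list := (List.range amount_col).foldl
        (fun new_list col =>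
          let mult_ele := (matrix.getD line []).getD col 0 * num
          let mult_ele := if line = col then (matrix.getD line []).getD col 0 * 0 else mult_ele
          new_list ++ [mult_ele])
        []
      new_matrix ++ [new_list])
    []

-- ===== PORT B =====
-- transliteration of B: recursion over rows carrying the diagonal index i; a row is
-- scale(row[:i]) + [0] + scale(row[i+1:]) when the diagonal exists, else scale(row).
-- (i ≥ 0 always, so Python's slices row[:i] / row[i+1:] are exactly take i / drop (i+1).)
def pvScale (num : Int) (xs : List Int) : List Int := xs.map (fun x => x * num)

def pvGo (num : Int) : List (List Int) → Nat → List (List Int)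
  | [], _ => []
  | row :: rest, i =>
    (if i < row.length
     then pvScale num (row.take i) ++ [0] ++ pvScale num (row.drop (i + 1))
     else pvScale num row) :: pvGo num rest (i + 1)

def multiplicMatrix_alt (matrix : List (List Int)) (num : Int) : List (List Int) :=
  pvGo num matrix 0

-- ===== PRECONDITION & SPEC =====
def Spec_multiplicMatrix (matrix : List (List Int)) (num : Int) (out : List (List Int)) : Prop := out = multiplicMatrix_alt matrix num
instance (matrix : List (List Int)) (num : Int) (out : List (List Int)) : Decidable (Spec_multiplicMatrix matrix num out) := by unfold Spec_multiplicMatrix; infer_instance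

-- ===== CLAIM =====
def Claim_equal_multiplicMatrix : Prop := ∀ (matrix : List (List Int)) (num : Int), Dom_multiplicMatrix matrix num → Spec_multiplicMatrix matrix num (multiplicMatrix matrix num)

-- ===== LEMMAS AND PROOFS =====

-- A's row as an indexed map
def pvRowA (num : Int) (row : List Int) (line : Nat) : List Int :=
  (List.range row.length).map (fun col =>
    if line = col then row.getD col 0 * 0 else row.getD col 0 * num)

-- foldl that appends one element per step is a map
theorem foldl_append_map {α β : Type} (f : α → β) (l : List α) (init : List β) :
    l.foldl (fun acc x => acc ++ [f x]) init = init ++ l.map f := by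
  induction l generalizing init with
  | nil => simp
  | cons a t ih => simp [List.foldl, ih]

theorem multiplicMatrix_eq_map (matrix : List (List Int)) (num : Int) :
    multiplicMatrix matrix num =
      (List.range matrix.length).map (fun line => pvRowA num (matrix.getD line []) line) := by
  unfold multiplicMatrix
  rw [foldl_append_map
    (fun line => (List.range (matrix.getD line []).length).foldl
      (fun new_list col =>
        new_list ++ [if line = col then (matrix.getD line []).getD col 0 * 0
                     else (matrix.getD line []).getD col 0 * num]) [])]
  simp only [List.nil_append]
  apply List.map_congr_left
  intro line _
  rw [foldl_append_map]
  simp [pvRowA]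

-- A's branching row equals B's sliced row
theorem rowA_eq_sliced (num : Int) (row : List Int) (i : Nat) :
    pvRowA num row i =
      (if i < row.length
       then pvScale num (row.take i) ++ [0] ++ pvScale num (row.drop (i + 1))
       else pvScale num row) := by
  unfold pvRowA pvScale
  split
  next h =>
    have ha : (List.map (fun x => x * num) (row.take i)).length = i := by
      simp [Nat.min_eq_left (Nat.le_of_lt h)]
    apply List.ext_getElem
    · simp; omega
    · intro c hc1 hc2
      simp only [List.length_map, List.length_range] at hc1
      rw [List.getElem_map, List.getElem_range]
      by_cases hci : c < i
      · rw [List.getElem_append_left (by simp; omega),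
            List.getElem_append_left (by omega : c < (List.map (fun x => x * num) (row.take i)).length),
            List.getElem_map, List.getElem_take]
        simp [Nat.ne_of_gt hci, List.getD, List.getElem?_eq_getElem hc1]
      · by_cases hce : c = i
        · rw [List.getElem_append_left (by simp; omega),
              List.getElem_append_right (by omega : (List.map (fun x => x * num) (row.take i)).length ≤ c)]
          simp [hce, List.getD]
        · have hgt : i < c := by omega
          rw [List.getElem_append_right (by simp; omega)]
          simp only [List.length_append, ha, List.length_cons, List.length_nil]
          rw [List.getElem_map, List.getElem_drop]
          have hne : ¬ i = c := by omega
          have hidx : i + 1 + (c - (i + 0 + 1)) = c := by omega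
          simp only [hidx, hne, if_false]
          simp [List.getD, List.getElem?_eq_getElem hc1]
  next h =>
    apply List.ext_getElem
    · simp
    · intro c hc1 hc2
      simp only [List.length_map, List.length_range] at hc1
      rw [List.getElem_map, List.getElem_range, List.getElem_map]
      have : ¬ i = c := by omega
      simp [this, List.getD, List.getElem?_eq_getElem hc1]

-- B's recursion as an indexed map with offset
theorem pvGo_eq_map (num : Int) (rows : List (List Int)) (i : Nat) :
    pvGo num rows i =
      (List.range rows.length).map (fun k => pvRowA num (rows.getD k []) (i + k)) := by
  induction rows generalizing i with
  | nil => simp [pvGo]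
  | cons row rest ih =>
    simp only [pvGo, List.length_cons, List.range_succ_eq_map, List.map_cons, List.map_map]
    simp only [List.cons.injEq]
    constructor
    · rw [rowA_eq_sliced]
      simp
    · rw [ih (i + 1)]
      apply List.map_congr_left
      intro k _
      simp [Function.comp]
      congr 1
      omega

-- ===== VERDICT =====
theorem multiplicMatrix_spec : Claim_equal_multiplicMatrix := by
  intro matrix num _
  unfold Spec_multiplicMatrix multiplicMatrix_alt
  rw [multiplicMatrix_eq_map, pvGo_eq_map]
  simp
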